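-- pv_equiv track=rewrite | github.com/QuyenNguyenHP/H429 | backend/app/api/api_dashboard.py | _infer_dg_from_label
-- ===== SOURCE A (Python) =====
-- def _normalize_dg_name(value: str | None) -> str | None:
--     if value is None:
--         return None
--     raw = str(value).strip().upper().replace(" ", "").replace("_", "-")
--     if raw in {"DG1", "DG#1", "DG-1"}:
--         return "DG#1"
--     if raw in {"DG2", "DG#2", "DG-2"}:
--         return "DG#2"
--     if raw in {"DG3", "DG#3", "DG-3"}:
--         return "DG#3"
--     if raw == "ME-PORT":
--         return "ME-PORT"
--     if raw == "ME-STBD":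
--         return "ME-STBD"
--     return value.strip() if isinstance(value, str) else None
--
-- def _infer_dg_from_label(label: str | None) -> str | None:
--     if label is None:
--         return None
--     text = str(label).strip()
--     candidates = (
--         "DG#1",
--         "DG#2",
--         "DG#3",
--         "ME-PORT",
--         "ME-STBD",
--         "ME_PORT",
--         "ME_STBD",
--     )
--     for prefix in candidates:
--         if text.startswith(prefix + " "):
--             return _normalize_dg_name(prefix)
--     return None
-- ===== SOURCE B (Python) =====
-- _DG_TABLE = {
--     "DG#1": "DG#1",
--     "DG#2": "DG#2",
--     "DG#3": "DG#3",
--     "ME-PORT": "ME-PORT",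
--     "ME-STBD": "ME-STBD",
--     "ME_PORT": "ME-PORT",
--     "ME_STBD": "ME-STBD",
-- }
--
-- def _infer_dg_from_label(label):
--     if label is None:
--         return None
--     text = str(label).strip()
--     i = text.find(" ")
--     if i == -1:
--         return None
--     return _DG_TABLE.get(text[:i])
-- ===== Notes on version B (the rewrite author's own statement) =====
-- stated objective: simpler
-- what changed: Replaces the per-candidate startswith scan (plus the normalization helper) with a single first-space find, one slice, and one lookup of the first token in a precomputed prefix-to-name dict.
import Mathlib
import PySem

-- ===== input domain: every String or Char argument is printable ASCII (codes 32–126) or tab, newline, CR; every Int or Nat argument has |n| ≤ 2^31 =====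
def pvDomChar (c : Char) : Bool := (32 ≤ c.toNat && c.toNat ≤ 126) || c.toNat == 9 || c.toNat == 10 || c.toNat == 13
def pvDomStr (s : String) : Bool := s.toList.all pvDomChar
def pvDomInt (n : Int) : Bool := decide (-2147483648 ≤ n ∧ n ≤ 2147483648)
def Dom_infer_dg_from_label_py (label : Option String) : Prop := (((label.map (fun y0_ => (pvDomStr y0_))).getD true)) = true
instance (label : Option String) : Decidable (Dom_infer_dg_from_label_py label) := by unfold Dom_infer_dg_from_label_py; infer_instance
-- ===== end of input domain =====

-- B replaces A's per-candidate startswith scan with one first-space find, a slice and a dict lookup of the first token (simpler, one pass).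


-- ===== PORT A =====
-- _normalize_dg_name; value is always a str here (the call sites pass a str), the None branch kept literally
def normalize_dg_name_py (value : Option String) : Option String :=
  match value with
  | none => none
  | some v =>
    let raw := PySem.Str.replace (PySem.Str.replace (PySem.Str.upper (PySem.Str.strip v)) " " "") "_" "-"
    if raw = "DG1" ∨ raw = "DG#1" ∨ raw = "DG-1" then some "DG#1"
    else if raw = "DG2" ∨ raw = "DG#2" ∨ raw = "DG-2" then some "DG#2"
    else if raw = "DG3" ∨ raw = "DG#3" ∨ raw = "DG-3" then some "DG#3"
    else if raw = "ME-PORT" then some "ME-PORT"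
    else if raw = "ME-STBD" then some "ME-STBD"
    else some (PySem.Str.strip v)   -- isinstance(value, str) is true: value is a str

-- the 'for prefix in candidates' loop
def inferLoop (text : String) : List String → Option String
  | [] => none
  | p :: rest =>
    if PySem.Str.startswith text (p ++ " ") then normalize_dg_name_py (some p)
    else inferLoop text rest

def infer_dg_from_label_py (label : Option String) : Option String :=
  match label with
  | none => none
  | some l =>
    inferLoop (PySem.Str.strip l) ["DG#1", "DG#2", "DG#3", "ME-PORT", "ME-STBD", "ME_PORT", "ME_STBD"]

-- ===== PORT B =====
def dgTable : PySem.Dict String String :=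
  PySem.Dict.ofList [("DG#1", "DG#1"), ("DG#2", "DG#2"), ("DG#3", "DG#3"),
                     ("ME-PORT", "ME-PORT"), ("ME-STBD", "ME-STBD"),
                     ("ME_PORT", "ME-PORT"), ("ME_STBD", "ME-STBD")]

def infer_dg_from_label_py_alt (label : Option String) : Option String :=
  match label with
  | none => none
  | some l =>
    let text := PySem.Str.strip l
    let i := PySem.Str.find text " "
    if i = -1 then none
    else dgTable.get? (PySem.Str.slice text none (some i))

-- ===== PRECONDITION & SPEC =====
def Spec_infer_dg_from_label_py (label : Option String) (out : Option String) : Prop := out = infer_dg_from_label_py_alt label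
instance (label : Option String) (out : Option String) : Decidable (Spec_infer_dg_from_label_py label out) := by unfold Spec_infer_dg_from_label_py; infer_instance

-- ===== CLAIM (what is proved, stated in full; the proofs are below) =====
def Claim_equal_infer_dg_from_label_py : Prop := ∀ (label : Option String), Dom_infer_dg_from_label_py label → Spec_infer_dg_from_label_py label (infer_dg_from_label_py label)

-- ===== LEMMAS AND PROOFS =====

-- a candidate containing a space cannot start a space-free text
lemma startswith_false_of_no_space (s : String) (p : String) (hp : ' ' ∈ p.toList)
    (h : ¬ [' '] <:+: s.toList) : PySem.Str.startswith s p = false := by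
  rw [Bool.eq_false_iff, Ne, PySem.Str.startswith_eq, PySem.Chars.startswith_iff]
  intro hpre
  exact h (List.IsInfix.trans ((List.singleton_infix_iff _ _).mpr hp) hpre.isInfix)

-- splitting a list at an element occurring in neither part is unique
lemma split_at_fresh_unique {α : Type} (c : α) :
    ∀ (a b u v : List α), c ∉ a → c ∉ b → a ++ c :: u = b ++ c :: v → a = b := by
  intro a
  induction a with
  | nil =>
    intro b u v _ hb he
    cases b with
    | nil => rfl
    | cons x xs =>
      simp only [List.nil_append, List.cons_append, List.cons.injEq] at he
      obtain ⟨h1, h2⟩ := he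
      subst h1
      exact absurd List.mem_cons_self hb
  | cons x xs ih =>
    intro b u v ha hb he
    cases b with
    | nil =>
      simp only [List.cons_append, List.nil_append, List.cons.injEq] at he
      obtain ⟨h1, h2⟩ := he
      subst h1
      exact absurd List.mem_cons_self ha
    | cons y ys =>
      simp only [List.cons_append, List.cons.injEq] at he
      have := ih ys u v (fun h => ha (List.mem_cons_of_mem _ h)) (fun h => hb (List.mem_cons_of_mem _ h)) he.2
      rw [he.1, this]

-- on a text of shape tok ++ ' ' :: u with tok space-free, startswith (p + " ") tests tok = p
lemma startswith_split (tok u : List Char) (htok : ' ' ∉ tok)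
    (pL : List Char) (hp : ' ' ∉ pL) :
    PySem.Chars.startswith (tok ++ ' ' :: u) (pL ++ [' ']) = true ↔ tok = pL := by
  rw [PySem.Chars.startswith_iff]
  constructor
  · rintro ⟨v, hv⟩
    rw [List.append_assoc, List.singleton_append] at hv
    exact (split_at_fresh_unique ' ' pL tok (v) u hp htok hv).symm
  · rintro rfl
    exact ⟨u, by simp⟩

-- the main equivalence on the stripped text
lemma loop_eq_lookup (s : String) :
    inferLoop s ["DG#1", "DG#2", "DG#3", "ME-PORT", "ME-STBD", "ME_PORT", "ME_STBD"] =
      (if PySem.Str.find s " " = -1 then none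
       else dgTable.get? (PySem.Str.slice s none (some (PySem.Str.find s " ")))) := by
  by_cases hf : PySem.Str.find s " " = -1
  · -- no space in the text: every startswith is false, the lookup branch is dead
    have hno : ¬ [' '] <:+: s.toList := by
      have := (PySem.Str.find_eq_neg_one_iff s " ").mp hf
      simpa using this
    rw [if_pos hf]
    simp only [inferLoop]
    rw [startswith_false_of_no_space s _ (by decide) hno,
        startswith_false_of_no_space s _ (by decide) hno,
        startswith_false_of_no_space s _ (by decide) hno,
        startswith_false_of_no_space s _ (by decide) hno,
        startswith_false_of_no_space s _ (by decide) hno,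
        startswith_false_of_no_space s _ (by decide) hno,
        startswith_false_of_no_space s _ (by decide) hno]
    rfl
  · -- a first space at index n: the text is tok ++ ' ' :: u with tok space-free
    have hk : 0 ≤ PySem.Str.find s " " := by
      have := PySem.Chars.neg_one_le_find (s := s.toList) (sub := " ".toList)
      rw [PySem.Str.find_eq] at hf ⊢
      omega
    obtain ⟨hpre, hmin⟩ := PySem.Chars.find_spec (s := s.toList) (sub := " ".toList)
      (by rw [← PySem.Str.find_eq]; exact hk)
    set k : Int := PySem.Str.find s " " with hkdef
    have hkc : PySem.Chars.find s.toList " ".toList = k := (PySem.Str.find_eq s " ").symm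
    rw [hkc] at hpre hmin
    set n : Nat := k.toNat with hndef
    obtain ⟨u, hu⟩ := hpre
    have hsplit : s.toList = s.toList.take n ++ ' ' :: u := by
      conv_lhs => rw [← List.take_append_drop n s.toList, ← hu]
      rfl
    set tok : List Char := s.toList.take n with htokdef
    have htok : ' ' ∉ tok := by
      intro hmem
      obtain ⟨i, hi, hgeti⟩ := List.mem_iff_getElem.mp hmem
      have hin : i < n := lt_of_lt_of_le hi (by simp [htokdef, List.length_take])
      have hilen : i < s.toList.length := by
        have := hi
        simp only [htokdef, List.length_take, lt_min_iff] at this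
        exact this.2
      apply hmin i hin
      refine ⟨s.toList.drop (i + 1), ?_⟩
      rw [List.drop_eq_getElem_cons hilen]
      have hgi : s.toList[i] = ' ' := by
        simpa [htokdef, List.getElem_take] using hgeti
      simp [hgi]
    -- per-candidate reduction: startswith tests the token
    have hcand : ∀ p : String, ' ' ∉ p.toList →
        PySem.Str.startswith s (p ++ " ") = decide (tok = p.toList) := by
      intro p hp
      rw [PySem.Str.startswith_eq]
      have htl : (p ++ " ").toList = p.toList ++ [' '] := by
        simp
      rw [htl, hsplit]
      by_cases h : tok = p.toList
      · simp only [h, decide_true]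
        exact (startswith_split _ u (h ▸ htok) _ hp).mpr rfl
      · simp only [h, decide_false, Bool.eq_false_iff, Ne]
        intro habs
        exact h ((startswith_split _ u htok _ hp).mp habs)
    -- the slice is exactly the token
    have hslice : (PySem.Str.slice s none (some k)).toList = tok := by
      rw [PySem.Str.toList_slice, PySem.Chars.slice_eq_listSlice, PySem.List.slice_to _ hk]
    have hkey : ∀ q : String, (q == PySem.Str.slice s none (some k)) = decide (tok = q.toList) := by
      intro q
      by_cases h : tok = q.toList
      · have he : PySem.Str.slice s none (some k) = q := String.toList_inj.mp (hslice.trans h)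
        simp [he, h]
      · have he : q ≠ PySem.Str.slice s none (some k) := by
          intro e
          exact h (by rw [e, hslice])
        simp [h, he]
    have hitems : dgTable.items = [("DG#1", "DG#1"), ("DG#2", "DG#2"), ("DG#3", "DG#3"),
                     ("ME-PORT", "ME-PORT"), ("ME-STBD", "ME-STBD"),
                     ("ME_PORT", "ME-PORT"), ("ME_STBD", "ME-STBD")] := by decide
    rw [if_neg hf]
    simp only [inferLoop]
    rw [hcand "DG#1" (by decide), hcand "DG#2" (by decide), hcand "DG#3" (by decide),
        hcand "ME-PORT" (by decide), hcand "ME-STBD" (by decide),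
        hcand "ME_PORT" (by decide), hcand "ME_STBD" (by decide)]
    simp only [PySem.Dict.get?, hitems, List.find?]
    rw [hkey "DG#1", hkey "DG#2", hkey "DG#3", hkey "ME-PORT", hkey "ME-STBD",
        hkey "ME_PORT", hkey "ME_STBD"]
    by_cases h1 : tok = ['D', 'G', '#', '1']
    · simp [h1]; decide
    by_cases h2 : tok = ['D', 'G', '#', '2']
    · simp [h2]; decide
    by_cases h3 : tok = ['D', 'G', '#', '3']
    · simp [h3]; decide
    by_cases h4 : tok = ['M', 'E', '-', 'P', 'O', 'R', 'T']
    · simp [h4]; decide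
    by_cases h5 : tok = ['M', 'E', '-', 'S', 'T', 'B', 'D']
    · simp [h5]; decide
    by_cases h6 : tok = ['M', 'E', '_', 'P', 'O', 'R', 'T']
    · simp [h6]; decide
    by_cases h7 : tok = ['M', 'E', '_', 'S', 'T', 'B', 'D']
    · simp [h7]; decide
    simp [h1, h2, h3, h4, h5, h6, h7]

-- ===== VERDICT (by name: the statement is the Claim_ definition above) =====
theorem infer_dg_from_label_py_spec : Claim_equal_infer_dg_from_label_py := by
  unfold Claim_equal_infer_dg_from_label_py
  intro label _
  unfold Spec_infer_dg_from_label_py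
  match label with
  | none => rfl
  | some l =>
    show inferLoop (PySem.Str.strip l) _ = _
    rw [loop_eq_lookup]
    rfl
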